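-- pv_equiv track=rewrite | github.com/amardipkumar91/PracticePython2 | problem_statement/reverse_string.py | reverse_string_without_affecting_number
-- ===== SOURCE A (Python) =====
-- def reverse_string_without_affecting_number(text):
--     temp = []
--     text = list(text)
--     for i in text:
--         if not i.isnumeric():
--             temp.append(i)
--     reverse_temp =  temp [::-1]
--     count = 0
--     for i in range(0,len(text)):
--         if not text[i].isnumeric():
--             text[i] = reverse_temp[count]
--             count +=1
--         else:
--             continue
--     return "".join(text)
-- ===== SOURCE B (Python) =====
-- def reverse_string_without_affecting_number(text):
--     chars = list(text)
--     left, right = 0, len(chars) - 1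
--     while left < right:
--         if chars[left].isnumeric():
--             left += 1
--         elif chars[right].isnumeric():
--             right -= 1
--         else:
--             chars[left], chars[right] = chars[right], chars[left]
--             left += 1
--             right -= 1
--     return "".join(chars)
-- ===== Notes on version B (the rewrite author's own statement) =====
-- stated objective: alternative
-- what changed: Replaces A's filter-then-reverse extra list plus counter-driven substitution pass with an in-place two-pointer sweep that skips digits from both ends and swaps the outermost non-digit pair, using O(1) extra space instead of two auxiliary lists.
import Mathlib
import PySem

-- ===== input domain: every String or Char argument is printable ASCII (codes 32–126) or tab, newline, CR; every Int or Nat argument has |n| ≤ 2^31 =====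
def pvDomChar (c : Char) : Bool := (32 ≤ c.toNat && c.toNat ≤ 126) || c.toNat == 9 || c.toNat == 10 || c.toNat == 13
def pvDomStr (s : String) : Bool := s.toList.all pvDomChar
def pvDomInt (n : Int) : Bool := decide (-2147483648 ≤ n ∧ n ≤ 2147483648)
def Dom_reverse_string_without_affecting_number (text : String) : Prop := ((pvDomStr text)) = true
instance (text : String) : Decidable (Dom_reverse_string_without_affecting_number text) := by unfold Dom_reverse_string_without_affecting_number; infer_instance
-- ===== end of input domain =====

-- B replaces A's filter+reverse auxiliary lists and counter-driven substitution pass by an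
-- in-place two-pointer sweep (skip digits from both ends, swap the outermost non-digit pair).
-- '.isnumeric()' is ported as PySem.Chars.isdigit: exact on the Dom's ASCII characters.

-- ===== PORT A =====
-- body of A's second loop: if text[i] is not numeric, text[i] = reverse_temp[count]; count += 1
-- (indices i and count are always in range when A runs, so getD/.set are exact there)
def pvALoopBody (reverse_temp : List Char) (st : List Char × Nat) (i : Int) : List Char × Nat :=
  if !(PySem.Chars.isdigit (st.1.getD i.toNat ' ')) then
    (st.1.set i.toNat (reverse_temp.getD st.2 ' '), st.2 + 1)
  else st

def reverse_string_without_affecting_number (text : String) : String :=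
  let textL := text.toList
  let temp := textL.foldl (fun acc i => if !(PySem.Chars.isdigit i) then acc ++ [i] else acc) ([] : List Char)
  let reverse_temp := (PySem.List.slice? temp none none (-1)).getD []   -- temp[::-1]; step ≠ 0, never none
  let res := (PySem.List.pyRange 0 (textL.length : Int) 1).foldl (pvALoopBody reverse_temp) (textL, 0)
  String.ofList res.1

-- ===== PORT B =====
-- Python's while-loop over (left, right); indices are always in range inside the loop, so getD/.set
-- are exact there.  right = len(chars)-1 is ported as the Nat 'len - 1' (for "" Python has
-- right = -1; in both cases left < right fails at once and the loop body never runs).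
def pvTpGo (xs : List Char) (l r : Nat) : List Char :=
  if h : l < r then
    if PySem.Chars.isdigit (xs.getD l ' ') then pvTpGo xs (l+1) r
    else if PySem.Chars.isdigit (xs.getD r ' ') then pvTpGo xs l (r-1)
    else pvTpGo ((xs.set l (xs.getD r ' ')).set r (xs.getD l ' ')) (l+1) (r-1)
  else xs
termination_by r - l
decreasing_by all_goals omega

def reverse_string_without_affecting_number_alt (text : String) : String :=
  let chars := text.toList
  String.ofList (pvTpGo chars 0 (chars.length - 1))

-- ===== PRECONDITION & SPEC =====
def Spec_reverse_string_without_affecting_number (text : String) (out : String) : Prop := out = reverse_string_without_affecting_number_alt text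
instance (text : String) (out : String) : Decidable (Spec_reverse_string_without_affecting_number text out) := by unfold Spec_reverse_string_without_affecting_number; infer_instance

-- ===== CLAIM (what is proved, stated in full; the proofs are below) =====
def Claim_equal_reverse_string_without_affecting_number : Prop := ∀ (text : String), Dom_reverse_string_without_affecting_number text → Spec_reverse_string_without_affecting_number text (reverse_string_without_affecting_number text)

-- ===== LEMMAS AND PROOFS =====

-- common specification: each non-digit position receives the next element of rs, digits stay
def pvFill : List Char → List Char → List Char
  | [], _ => []
  | c :: cs, rs =>
    if PySem.Chars.isdigit c then c :: pvFill cs rs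
    else rs.headD ' ' :: pvFill cs rs.tail

def pvNd (c : Char) : Bool := !(PySem.Chars.isdigit c)

-- digits kept in place, non-digit subsequence reversed
def pvMrg (ys : List Char) : List Char := pvFill ys ((ys.filter pvNd).reverse)

theorem pvFill_append (xs ys rs : List Char) :
    pvFill (xs ++ ys) rs = pvFill xs rs ++ pvFill ys (rs.drop (xs.countP pvNd)) := by
  induction xs generalizing rs with
  | nil => simp [pvFill]
  | cons c cs ih =>
    by_cases h : PySem.Chars.isdigit c
    · simp [pvFill, h, pvNd, ih]
    · simp [pvFill, h, pvNd, ih, List.drop_tail]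

theorem pvFill_extra (xs rs extra : List Char) (h : xs.countP pvNd ≤ rs.length) :
    pvFill xs (rs ++ extra) = pvFill xs rs := by
  induction xs generalizing rs with
  | nil => rfl
  | cons c cs ih =>
    by_cases hc : PySem.Chars.isdigit c
    · simp only [pvFill, hc, if_pos]
      rw [ih rs (by simpa [pvNd, hc] using h)]
    · have h1 : 1 ≤ rs.length := by
        have := h; simp [pvNd, hc] at this; omega
      obtain ⟨a, rs', rfl⟩ : ∃ a rs', rs = a :: rs' := by
        cases rs with
        | nil => simp at h1
        | cons a rs' => exact ⟨a, rs', rfl⟩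
      simp only [pvFill, hc, Bool.false_eq_true, if_false, List.cons_append,
        List.headD_cons, List.tail_cons]
      rw [ih rs' (by simp [pvNd, hc] at h ⊢; omega)]

theorem pvMrg_single (c : Char) : pvMrg [c] = [c] := by
  by_cases h : PySem.Chars.isdigit c <;> simp [pvMrg, pvFill, pvNd, h]

theorem pvMrg_cons_digit {c : Char} (h : PySem.Chars.isdigit c = true) (ys : List Char) :
    pvMrg (c :: ys) = c :: pvMrg ys := by
  simp [pvMrg, pvFill, pvNd, h]

theorem pvMrg_append_digit {d : Char} (h : PySem.Chars.isdigit d = true) (ys : List Char) :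
    pvMrg (ys ++ [d]) = pvMrg ys ++ [d] := by
  simp [pvMrg, pvNd, h, List.filter_append, pvFill_append, pvFill]

theorem pvMrg_swap {c d : Char} (hc : PySem.Chars.isdigit c = false)
    (hd : PySem.Chars.isdigit d = false) (mid : List Char) :
    pvMrg (c :: (mid ++ [d])) = d :: pvMrg mid ++ [c] := by
  have hcnt : mid.countP pvNd = ((mid.filter pvNd).reverse).length := by
    simp [List.countP_eq_length_filter]
  have h1 : ((c :: (mid ++ [d])).filter pvNd).reverse
      = d :: ((mid.filter pvNd).reverse ++ [c]) := by
    simp [pvNd, hc, hd, List.filter_append]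
  rw [pvMrg, h1]
  simp only [pvFill, hc, Bool.false_eq_true, if_false, List.headD_cons, List.tail_cons]
  rw [pvFill_append, hcnt, List.drop_left]
  rw [pvFill_extra mid _ [c] (le_of_eq hcnt)]
  simp [pvFill, hd, pvMrg]

-- helpers: getD / set at the junction of an append
theorem pvGetD_append_length (pre rest : List Char) (c x : Char) :
    (pre ++ c :: rest).getD pre.length x = c := by
  simp

theorem pvSet_append_length (pre rest : List Char) (c v : Char) :
    (pre ++ c :: rest).set pre.length v = pre ++ v :: rest := by
  induction pre with
  | nil => rfl
  | cons a pre ih => simp [ih]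

-- the two-pointer loop, run on the region 'mid', realises pvMrg on it
theorem pvTpGo_decomp : ∀ (n : Nat) (pre mid post : List Char), mid.length = n →
    pvTpGo (pre ++ mid ++ post) pre.length (pre.length + mid.length - 1)
      = pre ++ pvMrg mid ++ post := by
  intro n
  induction n using Nat.strong_induction_on with
  | _ n ih =>
    intro pre mid post hlen
    by_cases h2 : 2 ≤ mid.length
    · -- mid = c :: mid1 ++ [d]
      obtain ⟨c, rest, rfl⟩ : ∃ c rest, mid = c :: rest := by
        cases mid with
        | nil => simp at h2
        | cons c rest => exact ⟨c, rest, rfl⟩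
      have hrestne : rest ≠ [] := by
        intro hn; rw [hn] at h2; simp at h2
      obtain ⟨mid1, d, rfl⟩ : ∃ mid1 d, rest = mid1 ++ [d] :=
        ⟨rest.dropLast, rest.getLast hrestne, (List.dropLast_append_getLast hrestne).symm⟩
      have hm : (c :: (mid1 ++ [d])).length = mid1.length + 2 := by simp
      have hr : pre.length + (c :: (mid1 ++ [d])).length - 1
          = pre.length + mid1.length + 1 := by simp; omega
      have hxs : pre ++ (c :: (mid1 ++ [d])) ++ post
          = pre ++ c :: (mid1 ++ ([d] ++ post)) := by simp
      have hgl : (pre ++ (c :: (mid1 ++ [d])) ++ post).getD pre.length ' ' = c := by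
        rw [hxs]; exact pvGetD_append_length _ _ _ _
      have hxs2 : pre ++ (c :: (mid1 ++ [d])) ++ post
          = (pre ++ c :: mid1) ++ d :: post := by simp
      have hlen2 : (pre ++ c :: mid1).length = pre.length + mid1.length + 1 := by
        simp; omega
      have hgr : (pre ++ (c :: (mid1 ++ [d])) ++ post).getD (pre.length + mid1.length + 1) ' ' = d := by
        rw [hxs2, ← hlen2]; exact pvGetD_append_length _ _ _ _
      rw [hr, pvTpGo, dif_pos (by omega), hgl, hgr]
      by_cases hc : PySem.Chars.isdigit c
      · rw [if_pos hc]
        have e1 : pre ++ (c :: (mid1 ++ [d])) ++ post = (pre ++ [c]) ++ (mid1 ++ [d]) ++ post := by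
          simp
        have e3 : pre.length + mid1.length + 1 = (pre ++ [c]).length + (mid1 ++ [d]).length - 1 := by
          simp only [List.length_append, List.length_cons, List.length_nil]; omega
        have e2 : pre.length + 1 = (pre ++ [c]).length := by simp
        rw [e1, e3, e2, ih (mid1.length + 1) (by omega) _ _ _ (by simp), pvMrg_cons_digit hc]
        simp
      · rw [if_neg hc]
        by_cases hd : PySem.Chars.isdigit d
        · rw [if_pos hd]
          have e1 : pre ++ (c :: (mid1 ++ [d])) ++ post = pre ++ (c :: mid1) ++ (d :: post) := by
            simp
          have e3 : pre.length + mid1.length + 1 - 1 = pre.length + (c :: mid1).length - 1 := by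
            simp only [List.length_cons]; omega
          rw [e1, e3, ih (mid1.length + 1) (by omega) _ _ _ (by simp)]
          rw [show (c :: (mid1 ++ [d])) = (c :: mid1) ++ [d] from rfl, pvMrg_append_digit hd]
          simp
        · rw [if_neg hd]
          have hset : ((pre ++ (c :: (mid1 ++ [d])) ++ post).set pre.length d).set
              (pre.length + mid1.length + 1) c = (pre ++ [d]) ++ mid1 ++ (c :: post) := by
            rw [hxs, pvSet_append_length]
            have e : pre ++ d :: (mid1 ++ ([d] ++ post)) = (pre ++ d :: mid1) ++ d :: post := by
              simp
            rw [e, show pre.length + mid1.length + 1 = (pre ++ d :: mid1).length by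
              simp only [List.length_append, List.length_cons]; omega, pvSet_append_length]
            simp
          rw [hset]
          have e3 : pre.length + mid1.length + 1 - 1 = (pre ++ [d]).length + mid1.length - 1 := by
            simp only [List.length_append, List.length_cons, List.length_nil]; omega
          have e2 : pre.length + 1 = (pre ++ [d]).length := by simp
          rw [e3, e2, ih mid1.length (by omega) _ _ _ rfl, pvMrg_swap (Bool.eq_false_iff.mpr hc) (Bool.eq_false_iff.mpr hd)]
          simp
    · -- region of length ≤ 1: the loop does nothing
      have h1 : mid.length ≤ 1 := by omega
      cases mid with
      | nil =>
        rw [pvTpGo, dif_neg (by simp)]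
        simp [pvMrg, pvFill]
      | cons c rest =>
        have : rest = [] := by
          cases rest with
          | nil => rfl
          | cons a b => simp at h1
        subst this
        rw [pvTpGo, dif_neg (by simp)]
        rw [pvMrg_single]

-- A's substitution loop over range(len) realises pvFill position by position
theorem pvLoopA : ∀ (suf pre rs : List Char) (cnt : Nat),
    (PySem.List.pyRange (pre.length : Int) ((pre.length : Int) + (suf.length : Int)) 1).foldl
      (pvALoopBody rs) (pre ++ suf, cnt)
    = (pre ++ pvFill suf (rs.drop cnt), cnt + suf.countP pvNd) := by
  intro suf
  induction suf with
  | nil =>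
    intro pre rs cnt
    simp [pvFill]
  | cons c cs ih =>
    intro pre rs cnt
    have hab : (pre.length : Int) < (pre.length : Int) + ((c :: cs).length : Int) := by
      simp only [List.length_cons]; push_cast; omega
    rw [PySem.List.pyRange_one_cons hab, List.foldl_cons]
    have hbody : pvALoopBody rs (pre ++ c :: cs, cnt) (pre.length : Int)
        = if PySem.Chars.isdigit c then (pre ++ c :: cs, cnt)
          else (pre ++ rs.getD cnt ' ' :: cs, cnt + 1) := by
      unfold pvALoopBody
      by_cases h : PySem.Chars.isdigit c
      · simp [h]
      · simp [h]
    rw [hbody]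
    by_cases h : PySem.Chars.isdigit c
    · rw [if_pos h]
      have e1 : pre ++ c :: cs = (pre ++ [c]) ++ cs := by simp
      have e3 : (pre.length : Int) + ((c :: cs).length : Int)
          = (((pre ++ [c]).length : Nat) : Int) + (cs.length : Int) := by
        simp only [List.length_append, List.length_cons, List.length_nil]; push_cast; ring
      have e2 : (pre.length : Int) + 1 = (((pre ++ [c]).length : Nat) : Int) := by
        simp
      rw [e1, e3, e2, ih]
      simp [pvFill, h, pvNd]
    · rw [if_neg h]
      have e1 : pre ++ rs.getD cnt ' ' :: cs = (pre ++ [rs.getD cnt ' ']) ++ cs := by simp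
      have e3 : (pre.length : Int) + ((c :: cs).length : Int)
          = (((pre ++ [rs.getD cnt ' ']).length : Nat) : Int) + (cs.length : Int) := by
        simp only [List.length_append, List.length_cons, List.length_nil]; push_cast; ring
      have e2 : (pre.length : Int) + 1 = (((pre ++ [rs.getD cnt ' ']).length : Nat) : Int) := by
        simp
      rw [e1, e3, e2, ih]
      have e4 : pvFill (c :: cs) (rs.drop cnt)
          = rs.getD cnt ' ' :: pvFill cs (rs.drop (cnt + 1)) := by
        simp [pvFill, h, List.tail_drop]
      rw [e4]
      simp only [List.countP_cons, pvNd, h, List.append_assoc, List.cons_append,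
        List.nil_append, Prod.mk.injEq]
      constructor
      · trivial
      · simp; omega

-- ===== VERDICT (by name: the statement is the Claim_ definition above) =====
theorem reverse_string_without_affecting_number_spec : Claim_equal_reverse_string_without_affecting_number := by
  unfold Claim_equal_reverse_string_without_affecting_number
  intro text _
  unfold Spec_reverse_string_without_affecting_number
  have hA : reverse_string_without_affecting_number text = String.ofList (pvMrg text.toList) := by
    simp only [reverse_string_without_affecting_number]
    have htemp : text.toList.foldl
        (fun acc i => if !(PySem.Chars.isdigit i) then acc ++ [i] else acc) []
        = text.toList.filter pvNd := by
      simpa [pvNd] using PySem.List.foldl_append_if pvNd (fun x => x) text.toList []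
    rw [htemp, PySem.List.slice?_none_none_neg_one, Option.getD_some]
    have hl := pvLoopA text.toList [] ((text.toList.filter pvNd).reverse) 0
    simp only [List.length_nil, Nat.cast_zero, zero_add, List.nil_append, List.drop_zero] at hl
    rw [hl]
    rfl
  have hB : reverse_string_without_affecting_number_alt text
      = String.ofList (pvMrg text.toList) := by
    simp only [reverse_string_without_affecting_number_alt]
    have hd := pvTpGo_decomp text.toList.length [] text.toList [] rfl
    simp only [List.nil_append, List.append_nil, List.length_nil, Nat.zero_add] at hd
    rw [hd]
  rw [hA, hB]
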